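-- pv_equiv track=rewrite | github.com/SeongHyeon-Yun/Progarmmers | 프로그래머스/lv1/12977. 소수 만들기/소수 만들기.py | solution
-- ===== SOURCE A (Python) =====
-- from itertools import combinations as combi
--
-- def solution(nums):
--     answer = []
--
--     numbers = combi(nums,3)
--     for number in numbers:
--         prime_num = []
--         for i in range(1,sum(number)+1):
--             if sum(number) % i == 0:
--                 prime_num.append(i)
--
--         if len(prime_num) == 2:
--             answer.append(sum(number))
--
--
--     return len(answer)
-- ===== SOURCE B (Python) =====
-- from itertools import combinations as combi
--
-- def solution(nums):
--     cnt = 0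
--     for c in combi(nums, 3):
--         s = c[0] + c[1] + c[2]
--         if s >= 2:
--             d = 2
--             while d * d <= s:
--                 if s % d == 0:
--                     break
--                 d += 1
--             else:
--                 cnt += 1
--     return cnt
-- ===== Notes on version B (the rewrite author's own statement) =====
-- stated objective: faster
-- what changed: Instead of enumerating every divisor of each 3-combination sum into a list and checking the list has length 2, B runs an early-exit trial division up to the square root of the sum and counts matches directly with an integer counter.
import Mathlib
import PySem

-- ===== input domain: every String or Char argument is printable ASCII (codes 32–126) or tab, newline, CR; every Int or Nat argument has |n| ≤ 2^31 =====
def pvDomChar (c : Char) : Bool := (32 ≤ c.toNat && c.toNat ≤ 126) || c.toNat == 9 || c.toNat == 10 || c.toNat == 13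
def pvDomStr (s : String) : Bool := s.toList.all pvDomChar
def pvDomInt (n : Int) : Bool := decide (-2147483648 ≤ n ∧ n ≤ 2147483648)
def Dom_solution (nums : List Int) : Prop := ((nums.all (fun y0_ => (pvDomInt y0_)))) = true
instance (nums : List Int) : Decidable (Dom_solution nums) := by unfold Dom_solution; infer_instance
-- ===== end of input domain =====

-- B replaces A's full divisor enumeration of each 3-combination sum by an early-exit
-- trial division up to the square root, counting directly instead of building lists. (objective: faster)

-- ===== PORT A =====
-- itertools.combinations(nums, 2) in index order (helper for combs3)
def combs2 : List Int → List (Int × Int)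
  | [] => []
  | x :: xs => (xs.map (fun y => (x, y))) ++ combs2 xs

-- itertools.combinations(nums, 3) in index order
def combs3 : List Int → List (Int × Int × Int)
  | [] => []
  | x :: xs => ((combs2 xs).map (fun p => (x, p.1, p.2))) ++ combs3 xs

def solution (nums : List Int) : Int :=
  let answer := (combs3 nums).foldl (fun answer number =>
    let prime_num := (PySem.List.pyRange 1 ((number.1 + number.2.1 + number.2.2) + 1) 1).foldl
      (fun pn i => if PySem.Int.mod (number.1 + number.2.1 + number.2.2) i == 0 then pn ++ [i] else pn) []
    if prime_num.length == 2 then answer ++ [number.1 + number.2.1 + number.2.2] else answer) []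
  (answer.length : Int)

-- ===== PORT B =====
-- termination helper for the 'while d*d <= s' loop (cited by the decreasing_by below)
theorem pvTD_lt (s d : Int) (h : d * d ≤ s) : (s + 2 - (d + 1)).toNat < (s + 2 - d).toNat := by
  have h0 : 0 ≤ s := le_trans (mul_self_nonneg d) h
  have h1 : d < s + 2 := by nlinarith [sq_nonneg (d - 1)]
  omega

-- the 'while d*d <= s: if s % d == 0: break / d += 1 ... else:' loop; true ↔ the else-branch runs (no break)
def isPrimeTD (s d : Int) : Bool :=
  if h : d * d ≤ s then
    if PySem.Int.mod s d == 0 then false else isPrimeTD s (d + 1)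
  else true
termination_by (s + 2 - d).toNat
decreasing_by exact pvTD_lt s d h

def solution_alt (nums : List Int) : Int :=
  (combs3 nums).foldl (fun cnt c =>
    if 2 ≤ c.1 + c.2.1 + c.2.2 then
      if isPrimeTD (c.1 + c.2.1 + c.2.2) 2 then cnt + 1 else cnt
    else cnt) 0

-- ===== PRECONDITION & SPEC =====
def Spec_solution (nums : List Int) (out : Int) : Prop := out = solution_alt nums
instance (nums : List Int) (out : Int) : Decidable (Spec_solution nums out) := by unfold Spec_solution; infer_instance

-- ===== CLAIM (what is proved, stated in full; the proofs are below) =====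
def Claim_equal_solution : Prop := ∀ (nums : List Int), Dom_solution nums → Spec_solution nums (solution nums)

-- ===== LEMMAS AND PROOFS =====

-- A's per-combination test, as a predicate on the sum
def predA (s : Int) : Bool :=
  ((PySem.List.pyRange 1 (s + 1) 1).filter (fun i => PySem.Int.mod s i == 0)).length == 2

-- B's per-combination test, as a predicate on the sum
def predB (s : Int) : Bool := decide (2 ≤ s) && isPrimeTD s 2

theorem isPrimeTD_iff (s : Int) :
    ∀ d : Int, 2 ≤ d →
      (isPrimeTD s d = true ↔ ∀ e : Int, d ≤ e → e * e ≤ s → ¬ e ∣ s) := by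
  intro d
  refine isPrimeTD.induct s
    (fun d => 2 ≤ d → (isPrimeTD s d = true ↔ ∀ e : Int, d ≤ e → e * e ≤ s → ¬ e ∣ s))
    ?_ ?_ ?_ d
  · intro d h hm _
    rw [isPrimeTD, dif_pos h, if_pos hm]
    constructor
    · intro hc; cases hc
    · intro hall
      exact absurd ((PySem.Int.mod_eq_zero_iff_dvd s d).mp (by simpa using hm)) (hall d le_rfl h)
  · intro d h hm ih hd
    rw [isPrimeTD, dif_pos h, if_neg hm]
    rw [ih (by omega)]
    constructor
    · intro hall e he hee hdvd
      by_cases heq : e = d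
      · subst heq
        exact hm (by simpa using (PySem.Int.mod_eq_zero_iff_dvd s e).mpr hdvd)
      · exact hall e (by omega) hee hdvd
    · intro hall e he hee hdvd; exact hall e (by omega) hee hdvd
  · intro d h hd
    rw [isPrimeTD, dif_neg h]
    constructor
    · intro _ e he hee _
      have : d * d ≤ e * e := mul_le_mul he he (by omega) (by omega)
      exact h (le_trans this hee)
    · intro _; rfl

-- the number of divisors of n counted over range n via k ↦ 1+k is the divisor-Finset's card
theorem countP_divisors (n : Nat) (hn : n ≠ 0) :
    (List.range n).countP (fun k : Nat => decide ((1 + (k : Int)) ∣ (n : Int))) = n.divisors.card := by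
  have h1 : (List.range n).countP (fun k : Nat => decide ((1 + (k : Int)) ∣ (n : Int)))
      = ((Finset.range n).filter (fun k : Nat => (1 + (k : Int)) ∣ (n : Int))).card := by
    rw [List.countP_eq_length_filter]; rfl
  rw [h1]
  apply Finset.card_bij (fun (k : Nat) _ => k + 1)
  · intro k hk
    simp only [Finset.mem_filter, Finset.mem_range] at hk
    rw [Nat.mem_divisors]
    refine ⟨?_, hn⟩
    have : ((k + 1 : Nat) : Int) ∣ (n : Int) := by push_cast; rw [add_comm]; exact hk.2
    exact_mod_cast this
  · intro a _ b _ hab; omega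
  · intro m hm
    rw [Nat.mem_divisors] at hm
    have h1 : 1 ≤ m := Nat.one_le_iff_ne_zero.mpr (by rintro rfl; exact hn (Nat.eq_zero_of_zero_dvd hm.1))
    have h2 : m ≤ n := Nat.le_of_dvd (Nat.pos_of_ne_zero hn) hm.1
    refine ⟨m - 1, ?_, by omega⟩
    simp only [Finset.mem_filter, Finset.mem_range]
    refine ⟨by omega, ?_⟩
    have : (1 : Int) + (m - 1 : Nat) = (m : Int) := by push_cast [h1]; omega
    rw [this]
    exact_mod_cast hm.1

theorem card_divisors_eq_two_iff (n : Nat) (hn : 2 ≤ n) : n.divisors.card = 2 ↔ n.Prime := by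
  constructor
  · intro hc
    have hsub : ({1, n} : Finset Nat) ⊆ n.divisors := by
      intro m hm
      simp only [Finset.mem_insert, Finset.mem_singleton] at hm
      rw [Nat.mem_divisors]
      rcases hm with rfl | rfl
      · exact ⟨one_dvd n, by omega⟩
      · exact ⟨dvd_rfl, by omega⟩
    have hpair : ({1, n} : Finset Nat).card = 2 := Finset.card_pair (by omega)
    have heq : ({1, n} : Finset Nat) = n.divisors :=
      Finset.eq_of_subset_of_card_le hsub (by omega)
    rw [Nat.prime_def]
    refine ⟨hn, fun m hm => ?_⟩
    have : m ∈ n.divisors := Nat.mem_divisors.mpr ⟨hm, by omega⟩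
    rw [← heq] at this
    simpa using this
  · intro hp
    rw [hp.divisors]
    exact Finset.card_pair (by have := hp.one_lt; omega)

theorem predA_eq_predB (s : Int) : predA s = predB s := by
  unfold predA predB
  by_cases hs : s ≤ 0
  · rw [PySem.List.pyRange_one_eq_nil (by omega)]
    simp [show ¬ (2 ≤ s) by omega]
  push_neg at hs
  rcases eq_or_lt_of_le (show (1:Int) ≤ s by omega) with rfl | hs2
  · decide
  have hs2' : (2:Int) ≤ s := by omega
  set n : Nat := s.toNat with hn
  have hsn : s = (n : Int) := by omega
  have hn2 : 2 ≤ n := by omega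
  -- the left side counts the divisors of n
  have hL : ((PySem.List.pyRange 1 (s + 1) 1).filter (fun i => PySem.Int.mod s i == 0)).length
      = n.divisors.card := by
    rw [PySem.List.pyRange_one, List.filter_map, List.length_map]
    have he : (s + 1 - 1).toNat = n := by omega
    rw [he, ← List.countP_eq_length_filter]
    rw [← countP_divisors n (by omega)]
    apply List.countP_congr
    intro k _
    simp only [Function.comp_apply, beq_iff_eq, decide_eq_true_eq]
    rw [PySem.Int.mod_eq_zero_iff_dvd, hsn]
  -- the right side decides primality of n
  have hR : isPrimeTD s 2 = true ↔ n.Prime := by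
    rw [isPrimeTD_iff s 2 le_rfl, Nat.prime_def_le_sqrt]
    constructor
    · intro hall
      refine ⟨hn2, fun m hm hsq hdvd => ?_⟩
      have hmm : (m : Int) * m ≤ s := by
        rw [hsn]; exact_mod_cast Nat.le_sqrt.mp hsq
      exact hall (m : Int) (by exact_mod_cast hm) hmm (by rw [hsn]; exact_mod_cast hdvd)
    · rintro ⟨-, hall⟩ e he hee hdvd
      have he0 : (0:Int) ≤ e := by omega
      have hsq : e.toNat ≤ Nat.sqrt n := Nat.le_sqrt.mpr (by
        have : ((e.toNat : Int)) * (e.toNat : Int) ≤ (n : Int) := by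
          rw [Int.toNat_of_nonneg he0, ← hsn]; exact hee
        exact_mod_cast this)
      refine hall e.toNat (by omega) hsq ?_
      have : ((e.toNat : Int)) ∣ (n : Int) := by
        rw [Int.toNat_of_nonneg he0, ← hsn]; exact hdvd
      exact_mod_cast this
  rw [hL]
  simp only [hs2', decide_true, Bool.true_and]
  rw [Bool.eq_iff_iff, beq_iff_eq]
  exact (card_divisors_eq_two_iff n hn2).trans hR.symm

-- generic shape of A's outer loop: append-if fold counted by countP
theorem foldA {α : Type} (p : α → Bool) (f : α → Int) (l : List α) (acc : List Int) :
    (l.foldl (fun ans x => if p x then ans ++ [f x] else ans) acc).length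
      = acc.length + l.countP p := by
  induction l generalizing acc with
  | nil => simp
  | cons x t ih =>
    simp only [List.foldl_cons, List.countP_cons, ih]
    by_cases h : p x = true <;> simp [h] <;> omega

-- generic shape of B's loop: a guarded counter fold counted by countP
theorem foldB {α : Type} (P : α → Prop) [DecidablePred P] (q : α → Bool) (l : List α) (c : Int) :
    (l.foldl (fun cnt x => if P x then (if q x then cnt + 1 else cnt) else cnt) c)
      = c + l.countP (fun x => decide (P x) && q x) := by
  induction l generalizing c with
  | nil => simp
  | cons x t ih =>
    simp only [List.foldl_cons, List.countP_cons, ih]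
    by_cases hP : P x
    · by_cases hq : q x = true <;> simp [hP, hq] <;> push_cast <;> ring
    · simp [hP]

theorem inner_eq (s : Int) :
    (((PySem.List.pyRange 1 (s + 1) 1).foldl
        (fun pn i => if PySem.Int.mod s i == 0 then pn ++ [i] else pn) []).length == 2) = predA s := by
  rw [PySem.List.foldl_append_if_eq_filter]
  simp only [List.nil_append]
  rfl

theorem solution_eq_countP (nums : List Int) :
    solution nums = ((combs3 nums).countP (fun t => predA (t.1 + t.2.1 + t.2.2)) : Int) := by
  unfold solution
  dsimp only
  rw [foldA (fun number : Int × Int × Int =>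
        (((PySem.List.pyRange 1 ((number.1 + number.2.1 + number.2.2) + 1) 1).foldl
          (fun pn i => if PySem.Int.mod (number.1 + number.2.1 + number.2.2) i == 0 then pn ++ [i] else pn)
          []).length == 2))
      (fun number : Int × Int × Int => number.1 + number.2.1 + number.2.2) (combs3 nums) []]
  simp only [List.length_nil, Nat.zero_add]
  congr 1
  apply List.countP_congr
  intro t _
  rw [inner_eq]

theorem solution_alt_eq_countP (nums : List Int) :
    solution_alt nums = ((combs3 nums).countP (fun t => predB (t.1 + t.2.1 + t.2.2)) : Int) := by
  unfold solution_alt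
  rw [foldB (fun c : Int × Int × Int => 2 ≤ c.1 + c.2.1 + c.2.2)
      (fun c : Int × Int × Int => isPrimeTD (c.1 + c.2.1 + c.2.2) 2) (combs3 nums) 0]
  rw [zero_add]
  congr 1

-- ===== VERDICT (by name: the statement is the Claim_ definition above) =====
theorem solution_spec : Claim_equal_solution := by
  intro nums _
  unfold Spec_solution
  rw [solution_eq_countP, solution_alt_eq_countP]
  congr 2
  funext t
  exact predA_eq_predB _
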